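-- pv_equiv track=rewrite | github.com/keguihua/autorunne | src/autorunne/core/auto_record.py | _is_ignored_path
-- ===== SOURCE A (Python) =====
-- def _is_ignored_path(path: str, ignored_paths: list[str]) -> bool:
--     normalized = path.strip().strip("/")
--     if not normalized:
--         return True
--     for ignored in ignored_paths:
--         clean = ignored.strip().strip("/")
--         if not clean:
--             continue
--         if normalized == clean or normalized.startswith(f"{clean}/"):
--             return True
--     return False
-- ===== SOURCE B (Python) =====
-- def _is_ignored_path(path: str, ignored_paths: list[str]) -> bool:
--     normalized = path.strip().strip("/")
--     if not normalized:
--         return True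
--     ignored_set = {clean for clean in (ig.strip().strip("/") for ig in ignored_paths) if clean}
--     prefix = ""
--     for ch in normalized:
--         if ch == "/" and prefix in ignored_set:
--             return True
--         prefix += ch
--     return prefix in ignored_set
-- ===== Notes on version B (the rewrite author's own statement) =====
-- stated objective: alternative
-- what changed: Instead of scanning every ignored entry and testing equality/startswith against the path, B builds a set of cleaned ignored entries once and walks the path's characters, testing each '/'-boundary prefix for set membership.
import Mathlib
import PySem

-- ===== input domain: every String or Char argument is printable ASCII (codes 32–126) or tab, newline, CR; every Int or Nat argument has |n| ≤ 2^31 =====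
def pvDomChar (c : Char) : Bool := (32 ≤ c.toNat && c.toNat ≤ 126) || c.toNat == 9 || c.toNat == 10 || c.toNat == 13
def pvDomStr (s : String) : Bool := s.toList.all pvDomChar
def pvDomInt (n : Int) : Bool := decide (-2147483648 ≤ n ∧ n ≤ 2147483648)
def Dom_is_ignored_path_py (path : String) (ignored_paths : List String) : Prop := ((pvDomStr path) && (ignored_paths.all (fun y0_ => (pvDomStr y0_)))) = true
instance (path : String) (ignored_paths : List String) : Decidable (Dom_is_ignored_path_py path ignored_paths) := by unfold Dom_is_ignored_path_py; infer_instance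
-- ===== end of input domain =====

-- B replaces A's scan over every ignored entry (startswith each) by one pass over the
-- path's characters, testing each '/'-boundary prefix for membership in a set built once.

-- ===== PORT A =====
-- shared cleaning step: s.strip().strip("/")
def cleanEntry (s : String) : String := PySem.Str.stripChars (PySem.Str.strip s) "/"

def igLoopA (normalized : String) : List String → Bool
  | [] => false
  | ig :: rest =>
    let clean := cleanEntry ig
    if clean == "" then igLoopA normalized rest
    else if normalized == clean || PySem.Str.startswith normalized (clean ++ "/") then true
    else igLoopA normalized rest

def is_ignored_path_py (path : String) (ignored_paths : List String) : Bool :=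
  let normalized := cleanEntry path
  if normalized == "" then true
  else igLoopA normalized ignored_paths

-- ===== PORT B =====
-- B's loop: walk the path's characters keeping the prefix read so far; at each '/'
-- (and, after the loop, for the whole path) test the prefix for set membership.
def prefLoopB (s : PySem.Set String) : List Char → List Char → Bool
  | acc, [] => PySem.Set.contains s (String.ofList acc)
  | acc, ch :: rest =>
    if ch == '/' && PySem.Set.contains s (String.ofList acc) then true
    else prefLoopB s (acc ++ [ch]) rest

def is_ignored_path_py_alt (path : String) (ignored_paths : List String) : Bool :=
  let normalized := cleanEntry path
  if normalized == "" then true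
  else
    let ignoredSet := PySem.Set.ofList ((ignored_paths.map cleanEntry).filter (fun c => !(c == "")))
    prefLoopB ignoredSet [] normalized.toList

-- ===== PRECONDITION & SPEC =====
def Spec_is_ignored_path_py (path : String) (ignored_paths : List String) (out : Bool) : Prop := out = is_ignored_path_py_alt path ignored_paths
instance (path : String) (ignored_paths : List String) (out : Bool) : Decidable (Spec_is_ignored_path_py path ignored_paths out) := by unfold Spec_is_ignored_path_py; infer_instance

-- ===== CLAIM (what is proved, stated in full; the proofs are below) =====
def Claim_equal_is_ignored_path_py : Prop := ∀ (path : String) (ignored_paths : List String), Dom_is_ignored_path_py path ignored_paths → Spec_is_ignored_path_py path ignored_paths (is_ignored_path_py path ignored_paths)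

-- ===== LEMMAS AND PROOFS =====

-- A's loop returns true iff some entry cleans to a nonempty c with n = c or c++"/" a prefix of n.
theorem igLoopA_iff (n : String) (igs : List String) :
    igLoopA n igs = true ↔
      ∃ ig ∈ igs, cleanEntry ig ≠ "" ∧
        (n = cleanEntry ig ∨ (cleanEntry ig).toList ++ ['/'] <+: n.toList) := by
  induction igs with
  | nil => simp [igLoopA]
  | cons ig rest ih =>
    rw [igLoopA]
    by_cases h0 : (cleanEntry ig == "") = true
    · simp only [h0, if_true]
      rw [ih]
      simp only [beq_iff_eq] at h0
      constructor
      · rintro ⟨x, hx, h⟩; exact ⟨x, List.mem_cons_of_mem _ hx, h⟩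
      · rintro ⟨x, hx, hne, h⟩
        rcases List.mem_cons.mp hx with rfl | hx
        · exact absurd h0 hne
        · exact ⟨x, hx, hne, h⟩
    · rw [if_neg h0]
      by_cases h1 : (n == cleanEntry ig || PySem.Str.startswith n (cleanEntry ig ++ "/")) = true
      · rw [if_pos h1]
        simp only [Bool.or_eq_true, beq_iff_eq, PySem.Str.startswith_eq,
          PySem.Chars.startswith_iff] at h1
        simp only [beq_iff_eq] at h0
        constructor
        · intro _
          refine ⟨ig, List.mem_cons_self, h0, ?_⟩
          rcases h1 with h | h
          · exact Or.inl h
          · exact Or.inr (by simpa using h)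
        · intro _; rfl
      · rw [if_neg h1, ih]
        simp only [Bool.or_eq_true, beq_iff_eq, PySem.Str.startswith_eq,
          PySem.Chars.startswith_iff, not_or] at h1
        constructor
        · rintro ⟨x, hx, h⟩; exact ⟨x, List.mem_cons_of_mem _ hx, h⟩
        · rintro ⟨x, hx, hne, h⟩
          rcases List.mem_cons.mp hx with rfl | hx
          · rcases h with h | h
            · exact absurd h h1.1
            · exact absurd (by simpa using h) h1.2
          · exact ⟨x, hx, hne, h⟩

-- B's loop returns true iff the whole remainder, or some '/'-boundary prefix, is in s.
theorem prefLoopB_iff (s : PySem.Set String) (l acc : List Char) :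
    prefLoopB s acc l = true ↔
      (String.ofList (acc ++ l) ∈ s ∨
        ∃ pre suf, l = pre ++ '/' :: suf ∧ String.ofList (acc ++ pre) ∈ s) := by
  induction l generalizing acc with
  | nil =>
    simp [prefLoopB]
  | cons ch rest ih =>
    rw [prefLoopB]
    by_cases hc : (ch == '/' && PySem.Set.contains s (String.ofList acc)) = true
    · simp only [hc, if_true, true_iff]
      simp only [Bool.and_eq_true, beq_iff_eq, PySem.Set.contains_iff] at hc
      exact Or.inr ⟨[], rest, by simp [hc.1], by simpa using hc.2⟩
    · rw [if_neg hc, ih]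
      simp only [Bool.and_eq_true, beq_iff_eq, PySem.Set.contains_iff, not_and_or] at hc
      constructor
      · rintro (h | ⟨pre, suf, rfl, h⟩)
        · exact Or.inl (by simpa using h)
        · exact Or.inr ⟨ch :: pre, suf, by simp, by simpa using h⟩
      · rintro (h | ⟨pre, suf, heq, h⟩)
        · exact Or.inl (by simpa using h)
        · cases pre with
          | nil =>
            simp at heq
            rcases hc with hc | hc
            · exact absurd heq.1 hc
            · simp at h; exact absurd h hc
          | cons p ps =>
            simp at heq
            obtain ⟨rfl, rfl⟩ := heq
            exact Or.inr ⟨ps, suf, rfl, by simpa using h⟩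

-- membership in B's cleaned, nonempty-filtered set
theorem mem_cleanSet_iff (x : String) (igs : List String) :
    x ∈ PySem.Set.ofList ((igs.map cleanEntry).filter (fun c => !(c == ""))) ↔
      (∃ ig ∈ igs, cleanEntry ig = x) ∧ x ≠ "" := by
  rw [PySem.Set.mem_ofList, List.mem_filter, List.mem_map]
  simp

-- ===== VERDICT (by name: the statement is the Claim_ definition above) =====
theorem is_ignored_path_py_spec : Claim_equal_is_ignored_path_py := by
  intro path igs _
  unfold Spec_is_ignored_path_py is_ignored_path_py is_ignored_path_py_alt
  by_cases hn : (cleanEntry path == "") = true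
  · simp only [hn, if_true]
  · rw [if_neg hn, if_neg hn]
    set n := cleanEntry path with hdef
    apply Bool.coe_iff_coe.mp
    rw [igLoopA_iff, prefLoopB_iff]
    constructor
    · rintro ⟨ig, hig, hne, h | h⟩
      · refine Or.inl ?_
        rw [List.nil_append, String.ofList_toList]
        exact (mem_cleanSet_iff _ _).mpr ⟨⟨ig, hig, h.symm⟩, fun he => hne (h ▸ he)⟩
      · obtain ⟨t, ht⟩ := h
        refine Or.inr ⟨(cleanEntry ig).toList, t, by rw [← ht]; simp, ?_⟩
        rw [List.nil_append, String.ofList_toList]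
        exact (mem_cleanSet_iff _ _).mpr ⟨⟨ig, hig, rfl⟩, hne⟩
    · rintro (h | ⟨pre, suf, heq, h⟩)
      · rw [List.nil_append, String.ofList_toList] at h
        obtain ⟨⟨ig, hig, hc⟩, hne⟩ := (mem_cleanSet_iff _ _).mp h
        exact ⟨ig, hig, hc ▸ hne, Or.inl hc.symm⟩
      · rw [List.nil_append] at h
        obtain ⟨⟨ig, hig, hc⟩, hne⟩ := (mem_cleanSet_iff _ _).mp h
        refine ⟨ig, hig, hc ▸ hne, Or.inr ?_⟩
        have : (cleanEntry ig).toList = pre := by rw [hc]; simp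
        rw [this, heq]
        exact ⟨suf, by simp⟩
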